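-- pv_equiv track=rewrite | github.com/matejm/project-euler | problem116.py | calculate
-- ===== SOURCE A (Python) =====
-- from collections import defaultdict
--
-- memo = defaultdict(int)
--
-- def calculate(tile, place):
--     if tile > place:
--         return 1
--
--     if memo[(tile, place)]:
--         return memo[(tile, place)]
--
--     place_tile = calculate(tile, place - tile)
--     skip_square = calculate(tile, place - 1)
--
--     r = place_tile + skip_square
--     memo[(tile, place)] = r
--     return r
-- ===== SOURCE B (Python) =====
-- def calculate(tile, place):
--     if tile > place:
--         return 1
--     dp = [1] * tile + [0] * (place - tile + 1)
--     for p in range(tile, place + 1):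
--         dp[p] = dp[p - tile] + dp[p - 1]
--     return dp[place]
-- ===== Notes on version B (the rewrite author's own statement) =====
-- stated objective: alternative
-- what changed: Replaces the top-down recursion with a global memo dict by a bottom-up DP over an explicit table dp[0..place] filled in one forward loop.
import Mathlib
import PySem

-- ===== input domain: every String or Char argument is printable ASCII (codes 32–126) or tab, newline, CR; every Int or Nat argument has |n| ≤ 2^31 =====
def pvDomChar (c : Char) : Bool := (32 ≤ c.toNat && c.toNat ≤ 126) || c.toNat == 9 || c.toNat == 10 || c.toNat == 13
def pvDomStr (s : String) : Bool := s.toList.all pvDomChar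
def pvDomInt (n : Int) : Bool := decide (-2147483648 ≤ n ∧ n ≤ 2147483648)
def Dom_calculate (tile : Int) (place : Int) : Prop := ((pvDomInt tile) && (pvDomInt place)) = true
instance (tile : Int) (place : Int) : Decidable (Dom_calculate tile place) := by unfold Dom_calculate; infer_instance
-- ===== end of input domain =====

-- B replaces A's memoised top-down recursion (global memo dict) by a bottom-up DP table filled in one forward loop (alternative decomposition, same cost).


-- ===== PORT A =====
-- A is a recursion caching results in the module-global defaultdict `memo`; the port
-- threads that dict through the recursion explicitly.  `if memo[(tile, place)]:` is the
-- defaultdict truthiness test, i.e. `getD … 0 ≠ 0` (the 0 a missing lookup inserts is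
-- itself falsy, so leaving it out of the dict is value-equivalent).  For tile ≤ 0 with
-- tile ≤ place Python recurses forever (RecursionError; outside Pre_): the `tile ≤ 0`
-- branch is a totality guard only, never reached inside Pre_.
def calcMemoA (tile : Int) (memo : PySem.Dict (Int × Int) Int) (place : Int) :
    Int × PySem.Dict (Int × Int) Int :=
  if tile > place then (1, memo)
  else if _h0 : tile ≤ 0 then (0, memo)  -- Python diverges here; excluded by Pre_
  else if memo.getD (tile, place) 0 ≠ 0 then (memo.getD (tile, place) 0, memo)
  else
    let r1 := calcMemoA tile memo (place - tile)        -- place_tile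
    let r2 := calcMemoA tile r1.2 (place - 1)           -- skip_square
    let r := r1.1 + r2.1
    (r, r2.2.insert (tile, place) r)
termination_by place.toNat
decreasing_by
  · omega
  · omega

-- Python's `memo` is a module-global cache persisting across calls; every value it ever
-- holds for a key is that key's unique correct value, so starting each call from the
-- empty cache returns the same value (the equivalence proved here is about that value).
def calculate (tile : Int) (place : Int) : Int :=
  (calcMemoA tile PySem.Dict.empty place).1

-- ===== PORT B =====
-- dp = [1]*tile + [0]*(place-tile+1); then for p in range(tile, place+1): dp[p] = dp[p-tile] + dp[p-1]; return dp[place].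
-- Inside Pre_ the loop runs with 1 ≤ tile ≤ p, so all indices are nonnegative and
-- in range; there `.toNat` indexing is exact for Python's dp[i].
def calculate_alt (tile : Int) (place : Int) : Int :=
  if tile > place then 1
  else
    let dp0 : List Int := List.replicate tile.toNat 1 ++ List.replicate (place - tile + 1).toNat 0
    let dp := (PySem.List.pyRange tile (place + 1) 1).foldl
      (fun (d : List Int) (p : Int) => d.set p.toNat (d.getD (p - tile).toNat 0 + d.getD (p - 1).toNat 0)) dp0
    dp.getD place.toNat 0

-- ===== PRECONDITION & SPEC =====
-- Pre_ excludes exactly the inputs where A never returns: for tile ≤ 0 and tile ≤ place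
-- A's recursion place → place - tile, place - 1 never reaches the base case (RecursionError).
def Pre_calculate (tile : Int) (place : Int) : Prop := 1 ≤ tile ∨ place < tile
instance (tile : Int) (place : Int) : Decidable (Pre_calculate tile place) := by unfold Pre_calculate; infer_instance
def pvWitness_calculate : Int × Int := (2, 7)

def Spec_calculate (tile : Int) (place : Int) (out : Int) : Prop := out = calculate_alt tile place
instance (tile : Int) (place : Int) (out : Int) : Decidable (Spec_calculate tile place out) := by unfold Spec_calculate; infer_instance

-- ===== CLAIM (what is proved, stated in full; the proofs are below) =====
def Claim_equal_calculate : Prop := ∀ (tile : Int) (place : Int), Dom_calculate tile place → Pre_calculate tile place → Spec_calculate tile place (calculate tile place)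

-- ===== LEMMAS AND PROOFS =====

-- proof-side reference: A's recurrence without the cache
def calcF (tile : Int) (place : Int) : Int :=
  if tile > place then 1
  else if _h0 : tile ≤ 0 then 0
  else calcF tile (place - tile) + calcF tile (place - 1)
termination_by place.toNat
decreasing_by
  · omega
  · omega

theorem calcF_base (tile place : Int) (h : place < tile) : calcF tile place = 1 := by
  rw [calcF]; simp [h]

theorem calcF_step (tile place : Int) (h1 : 1 ≤ tile) (h2 : tile ≤ place) :
    calcF tile place = calcF tile (place - tile) + calcF tile (place - 1) := by
  rw [calcF]
  have : ¬ tile > place := by omega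
  simp [this]
  omega

-- a cache state is good if every nonzero entry for this tile is the reference value
def GoodMemo (tile : Int) (memo : PySem.Dict (Int × Int) Int) : Prop :=
  ∀ p : Int, memo.getD (tile, p) 0 ≠ 0 → memo.getD (tile, p) 0 = calcF tile p

theorem calcMemoA_correct (tile : Int) (h1 : 1 ≤ tile) :
    ∀ (n : Nat) (place : Int), place.toNat ≤ n →
      ∀ (memo : PySem.Dict (Int × Int) Int), GoodMemo tile memo →
        (calcMemoA tile memo place).1 = calcF tile place
          ∧ GoodMemo tile (calcMemoA tile memo place).2 := by
  intro n
  induction n with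
  | zero =>
    intro place hpl memo hg
    have hb : tile > place := by omega
    rw [calcMemoA, if_pos hb, calcF_base tile place hb]
    exact ⟨rfl, hg⟩
  | succ n ih =>
    intro place hpl memo hg
    by_cases hb : tile > place
    · rw [calcMemoA, if_pos hb, calcF_base tile place hb]
      exact ⟨rfl, hg⟩
    · have h2 : tile ≤ place := by omega
      rw [calcMemoA, if_neg hb, dif_neg (by omega : ¬ tile ≤ 0)]
      by_cases hm : memo.getD (tile, place) 0 ≠ 0
      · rw [if_pos hm]
        exact ⟨hg place hm, hg⟩
      · rw [if_neg hm]
        obtain ⟨ih1v, ih1g⟩ := ih (place - tile) (by omega) memo hg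
        obtain ⟨ih2v, ih2g⟩ := ih (place - 1) (by omega) _ ih1g
        simp only []
        rw [ih1v, ih2v]
        constructor
        · exact (calcF_step tile place h1 h2).symm
        · intro p hp
          by_cases hpq : p = place
          · subst hpq
            rw [PySem.Dict.getD_insert]
            simp [← calcF_step tile p h1 h2]
          · rw [PySem.Dict.getD_insert] at hp ⊢
            have hne : ¬ ((tile, p) = (tile, place)) := by simp [hpq]
            rw [if_neg hne] at hp ⊢
            exact ih2g p hp

theorem calculate_eq_calcF (tile place : Int) (h1 : 1 ≤ tile) :
    calculate tile place = calcF tile place := by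
  unfold calculate
  exact (calcMemoA_correct tile h1 place.toNat place (le_refl _) PySem.Dict.empty
    (by intro p hp; simp [PySem.Dict.getD_empty] at hp)).1

-- the loop invariant: after folding over range(tile, q), the table has unchanged length
-- and its entries below q equal the reference values
theorem dp_invariant (tile place : Int) (h1 : 1 ≤ tile) (h2 : tile ≤ place) :
    ∀ (k : Nat), (tile + k ≤ place + 1) →
      (((PySem.List.pyRange tile (tile + k) 1).foldl
          (fun (d : List Int) (p : Int) => d.set p.toNat (d.getD (p - tile).toNat 0 + d.getD (p - 1).toNat 0))
          (List.replicate tile.toNat 1 ++ List.replicate (place - tile + 1).toNat 0)).length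
        = (place + 1).toNat)
      ∧ (∀ (i : Nat), (i : Int) < tile + k →
          ((PySem.List.pyRange tile (tile + k) 1).foldl
              (fun (d : List Int) (p : Int) => d.set p.toNat (d.getD (p - tile).toNat 0 + d.getD (p - 1).toNat 0))
              (List.replicate tile.toNat 1 ++ List.replicate (place - tile + 1).toNat 0)).getD i 0
            = calcF tile i) := by
  intro k
  induction k with
  | zero =>
    intro _
    rw [PySem.List.pyRange_one_eq_nil (by omega)]
    constructor
    · simp; omega
    · intro i hi
      simp only [List.foldl_nil]
      have hit : i < tile.toNat := by omega
      rw [List.getD_append _ _ _ _ (by simpa using hit)]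
      rw [calcF_base tile i (by omega)]
      simp [List.getD_eq_getElem?_getD, hit]
  | succ k ih =>
    intro hk
    have hq : tile ≤ tile + k := by omega
    obtain ⟨ihlen, ihval⟩ := ih (by omega)
    have hsplit : PySem.List.pyRange tile (tile + (k + 1)) 1
        = PySem.List.pyRange tile (tile + k) 1 ++ [tile + k] := by
      have : tile + ((k : Int) + 1) = (tile + k) + 1 := by ring
      rw [show ((k : Nat) + 1 : Int) = (k : Int) + 1 by omega, this,
        PySem.List.pyRange_one_succ_right hq]
    push_cast
    rw [hsplit, List.foldl_append]
    set d := (PySem.List.pyRange tile (tile + k) 1).foldl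
      (fun (d : List Int) (p : Int) => d.set p.toNat (d.getD (p - tile).toNat 0 + d.getD (p - 1).toNat 0))
      (List.replicate tile.toNat 1 ++ List.replicate (place - tile + 1).toNat 0) with hd
    simp only [List.foldl_cons, List.foldl_nil]
    have hlen2 : (d.set (tile + (k : Int)).toNat
        (d.getD ((tile + (k : Int)) - tile).toNat 0 + d.getD ((tile + (k : Int)) - 1).toNat 0)).length
        = (place + 1).toNat := by simp [ihlen]
    refine ⟨hlen2, ?_⟩
    intro i hi
    have hqn : (tile + (k : Int)).toNat < (place + 1).toNat := by omega
    by_cases hiq : i = (tile + (k : Int)).toNat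
    · -- the freshly written cell
      have hv1 : d.getD ((tile + (k : Int)) - tile).toNat 0 = calcF tile ((tile + (k : Int)) - tile) := by
        have := ihval ((tile + (k : Int)) - tile).toNat (by omega)
        rwa [show ((((tile + (k : Int)) - tile).toNat : Int)) = (tile + (k : Int)) - tile by omega] at this
      have hv2 : d.getD ((tile + (k : Int)) - 1).toNat 0 = calcF tile ((tile + (k : Int)) - 1) := by
        have := ihval ((tile + (k : Int)) - 1).toNat (by omega)
        rwa [show ((((tile + (k : Int)) - 1).toNat : Int)) = (tile + (k : Int)) - 1 by omega] at this
      subst hiq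
      rw [List.getD_eq_getElem?_getD, List.getElem?_set_self (by omega), Option.getD_some, hv1, hv2,
        show (((tile + (k : Int)).toNat : Int)) = tile + (k : Int) by omega,
        ← calcF_step tile (tile + (k : Int)) h1 (by omega)]
    · -- an older cell, untouched by this write
      rw [List.getD_eq_getElem?_getD, List.getElem?_set_ne (by omega), ← List.getD_eq_getElem?_getD]
      exact ihval i (by omega)

theorem alt_eq_calcF (tile place : Int) (h1 : 1 ≤ tile) (h2 : tile ≤ place) :
    calculate_alt tile place = calcF tile place := by
  unfold calculate_alt
  have h : ¬ tile > place := by omega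
  simp only [h, if_false]
  obtain ⟨k, hk⟩ : ∃ k : Nat, place + 1 = tile + k := ⟨(place + 1 - tile).toNat, by omega⟩
  obtain ⟨hlen, hval⟩ := dp_invariant tile place h1 h2 k (by omega)
  rw [← hk] at hval
  have := hval place.toNat (by omega)
  rw [show ((place.toNat : Int)) = place by omega] at this
  simpa [hk] using this

-- ===== VERDICT (by name: the statement is the Claim_ definition above) =====
theorem calculate_spec : Claim_equal_calculate := by
  intro tile place _ hpre
  unfold Spec_calculate
  by_cases h : tile > place
  · unfold calculate calculate_alt
    rw [calcMemoA, if_pos h]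
    simp [h]
  · have h1 : 1 ≤ tile := by rcases hpre with h1 | h2; exact h1; omega
    have h2 : tile ≤ place := by omega
    rw [calculate_eq_calcF tile place h1, alt_eq_calcF tile place h1 h2]
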